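-- pv_equiv track=rewrite | github.com/InstituteForIndustrialEconomics/fincausal-2020 | utils/data_processing.py | get_sublist_positions
-- ===== SOURCE A (Python) =====
-- def get_sublist_positions(
--         whole_list: list,
--         sublist: list
--     ):
--     result = []
--     for i in range(len(whole_list) - len(sublist) + 1):
--         if sublist == whole_list[i: i + len(sublist)]:
--             result = list(range(i, len(sublist) + i))
--     return result
-- ===== SOURCE B (Python) =====
-- def get_sublist_positions(whole_list, sublist):
--     # Bitap (shift-and) matching: bit k of S is set iff the last k+1 scanned
--     # elements equal sublist[:k+1]; one left-to-right pass, no slice comparisons.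
--     m = len(sublist)
--     if m == 0:
--         return []
--     mask = {}
--     for k, c in enumerate(sublist):
--         mask[c] = mask.get(c, 0) | (1 << k)
--     goal = 1 << (m - 1)
--     S = 0
--     last_end = -1
--     for j, x in enumerate(whole_list):
--         S = ((S << 1) | 1) & mask.get(x, 0)
--         if S & goal:
--             last_end = j
--     if last_end < 0:
--         return []
--     return list(range(last_end - m + 1, last_end + 1))
-- ===== Notes on version B (the rewrite author's own statement) =====
-- stated objective: alternative
-- what changed: B replaces A's sliding-window slice comparison with bitap (shift-and) matching: per-element bitmasks built once in a dict, then one left-to-right pass updating a single bitmask whose bit k says the last k+1 scanned elements equal sublist[:k+1], recording the last full-match end; no slices are compared.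
import Mathlib
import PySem

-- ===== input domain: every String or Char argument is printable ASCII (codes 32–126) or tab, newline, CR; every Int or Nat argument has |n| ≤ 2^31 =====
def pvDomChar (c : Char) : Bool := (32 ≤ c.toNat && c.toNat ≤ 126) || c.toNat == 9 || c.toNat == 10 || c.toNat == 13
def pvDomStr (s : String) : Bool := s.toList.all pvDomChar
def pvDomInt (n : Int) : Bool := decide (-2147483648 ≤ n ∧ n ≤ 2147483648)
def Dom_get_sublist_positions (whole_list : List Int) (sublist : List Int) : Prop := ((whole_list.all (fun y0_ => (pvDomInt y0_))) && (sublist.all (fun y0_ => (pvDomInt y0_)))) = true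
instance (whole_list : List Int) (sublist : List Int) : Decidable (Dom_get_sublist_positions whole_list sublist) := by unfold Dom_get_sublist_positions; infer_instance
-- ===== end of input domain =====

-- ===== PORT A =====
-- A: for i in range(len(whole_list)-len(sublist)+1): if sublist == whole_list[i:i+len(sublist)]: result = list(range(i, len(sublist)+i))
def get_sublist_positions (whole_list : List Int) (sublist : List Int) : List Int :=
  (PySem.List.pyRange 0 ((whole_list.length : Int) - (sublist.length : Int) + 1) 1).foldl
    (fun result i =>
      if sublist = PySem.List.slice whole_list (some i) (some (i + (sublist.length : Int))) then
        PySem.List.pyRange i ((sublist.length : Int) + i) 1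
      else result) []

-- ===== PORT B =====
-- B (from Source B): bitap (shift-and) matching; bit k of S is set iff the last k+1 scanned elements
-- equal sublist[:k+1]; per-element masks built once in a dict; last full-match end recorded.
-- The Python bitmask ints (mask values, S, goal) are nonnegative throughout, so Nat represents them
-- exactly; 1 << k uses the enumerate index k ≥ 0, so .toNat is exact there.
def get_sublist_positions_alt (whole_list : List Int) (sublist : List Int) : List Int :=
  if sublist.length = 0 then []
  else
    let mask := (PySem.List.enumerate sublist 0).foldl
      (fun (d : PySem.Dict Int Nat) kc => d.insert kc.2 ((d.getD kc.2 0) ||| (1 <<< kc.1.toNat)))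
      PySem.Dict.empty
    let goal := (1 : Nat) <<< (sublist.length - 1)
    let st := (PySem.List.enumerate whole_list 0).foldl
      (fun (st : Nat × Int) jx =>
        let S' := ((st.1 <<< 1) ||| 1) &&& mask.getD jx.2 0
        (S', if S' &&& goal ≠ 0 then jx.1 else st.2))
      ((0 : Nat), (-1 : Int))
    if st.2 < 0 then []
    else PySem.List.pyRange (st.2 - (sublist.length : Int) + 1) (st.2 + 1) 1

-- ===== PRECONDITION & SPEC =====
def Spec_get_sublist_positions (whole_list : List Int) (sublist : List Int) (out : List Int) : Prop := out = get_sublist_positions_alt whole_list sublist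
instance (whole_list : List Int) (sublist : List Int) (out : List Int) : Decidable (Spec_get_sublist_positions whole_list sublist out) := by unfold Spec_get_sublist_positions; infer_instance

-- ===== CLAIM (what is proved, stated in full; the proofs are below) =====
def Claim_equal_get_sublist_positions : Prop := ∀ (whole_list : List Int) (sublist : List Int), Dom_get_sublist_positions whole_list sublist → Spec_get_sublist_positions whole_list sublist (get_sublist_positions whole_list sublist)

-- ===== LEMMAS AND PROOFS =====

-- proof helpers (used only below)

-- right-to-left scan returning the first (= last) slice match, bridging A's foldl
def altGo (whole_list : List Int) (sublist : List Int) : List Int → List Int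
  | [] => []
  | i :: rest =>
      if sublist = PySem.List.slice whole_list (some i) (some (i + (sublist.length : Int))) then
        PySem.List.pyRange i ((sublist.length : Int) + i) 1
      else altGo whole_list sublist rest

-- index (as Int) of the last candidate start < c at which sublist matches as a slice, else -1
def lastStartC (w s : List Int) : Nat → Int
  | 0 => -1
  | c+1 =>
      if s = PySem.List.slice w (some (c : Int)) (some ((c : Int) + (s.length : Int))) then (c : Int)
      else lastStartC w s c

-- index of the last position where s ends as a suffix, computed on the REVERSED prefix, else -1
def lastEndRev (s : List Int) : List Int → Int
  | [] => -1
  | x :: r => if s.reverse <+: (x :: r) then (r.length : Int) else lastEndRev s r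

def ofStart (m : Nat) (v : Int) : Int := if v < 0 then -1 else v + (m : Int) - 1

theorem foldl_last_eq_altGo_reverse (w s : List Int) (L : List Int) :
    L.foldl
      (fun result i =>
        if s = PySem.List.slice w (some i) (some (i + (s.length : Int))) then
          PySem.List.pyRange i ((s.length : Int) + i) 1
        else result) []
    = altGo w s L.reverse := by
  induction L using List.reverseRecOn with
  | nil => simp [altGo]
  | append_singleton L' x ih =>
      rw [List.foldl_append, List.reverse_append]
      simp only [List.foldl_cons, List.foldl_nil, List.reverse_cons, List.reverse_nil,
        List.nil_append, List.singleton_append, altGo]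
      split_ifs with h
      · rfl
      · exact ih

def maskOf (s : List Int) : PySem.Dict Int Nat :=
  (PySem.List.enumerate s 0).foldl
    (fun (d : PySem.Dict Int Nat) kc => d.insert kc.2 ((d.getD kc.2 0) ||| (1 <<< kc.1.toNat)))
    PySem.Dict.empty

def foldB (s p : List Int) : Nat × Int :=
  (PySem.List.enumerate p 0).foldl
    (fun (st : Nat × Int) jx =>
      let S' := ((st.1 <<< 1) ||| 1) &&& (maskOf s).getD jx.2 0
      (S', if S' &&& ((1 : Nat) <<< (s.length - 1)) ≠ 0 then jx.1 else st.2))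
    ((0 : Nat), (-1 : Int))

theorem suffix_concat_iff (l q : List Int) (a b : Int) :
    (l ++ [a]) <:+ (q ++ [b]) ↔ a = b ∧ l <:+ q := by
  rw [← List.reverse_prefix]
  simp [List.cons_prefix_cons]

theorem take_succ_suffix_iff (s p : List Int) (x : Int) (k : Nat) (hk : k < s.length) :
    ((s.take (k+1)) <:+ p ++ [x]) ↔ ((s.take k <:+ p) ∧ x = s[k]) := by
  rw [List.take_add_one, List.getElem?_eq_getElem hk]
  simp only [Option.toList_some]
  rw [suffix_concat_iff]
  constructor
  · rintro ⟨h1, h2⟩; exact ⟨h2, h1.symm⟩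
  · rintro ⟨h1, h2⟩; exact ⟨h2.symm, h1⟩

theorem mask_inv (s : List Int) :
    ∀ (x : Int) (k : Nat),
      ((maskOf s).getD x 0).testBit k = decide (k < s.length ∧ s[k]? = some x) := by
  unfold maskOf
  induction s using List.reverseRecOn with
  | nil =>
      intro x k
      simp [PySem.List.enumerate_nil, PySem.Dict.getD_empty]
  | append_singleton q c ih =>
      intro x k
      rw [PySem.List.enumerate_append, List.foldl_append]
      simp only [PySem.List.enumerate_cons, PySem.List.enumerate_nil, List.foldl_cons,
        List.foldl_nil]
      rw [PySem.Dict.getD_insert]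
      by_cases hx : x = c
      · rw [if_pos hx]
        rw [Nat.testBit_or, ih c k]
        have hsh : ((1 : Nat) <<< ((0 : Int) + (q.length : Int)).toNat).testBit k
            = decide (k = q.length) := by
          rw [Nat.one_shiftLeft, Nat.testBit_two_pow]
          simp [eq_comm]
        rw [hsh]
        subst hx
        rcases Nat.lt_trichotomy k q.length with hk | hk | hk
        · simp [hk, Nat.lt_succ_of_lt hk, Nat.ne_of_lt hk]
        · subst hk
          simp
        · have h1 : ¬ k < q.length := by omega
          have h2 : ¬ k < q.length + 1 := by omega
          have h3 : ¬ k = q.length := by omega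
          simp [h1, h2, h3]
      · rw [if_neg hx, ih x k]
        rcases Nat.lt_trichotomy k q.length with hk | hk | hk
        · simp [hk, Nat.lt_succ_of_lt hk]
        · subst hk
          simp [Ne.symm hx]
        · have h1 : ¬ k < q.length := by omega
          have h2 : ¬ k < q.length + 1 := by omega
          simp [h1, h2]

theorem and_goal_ne (S n : Nat) : (S &&& ((1 : Nat) <<< n) ≠ 0) ↔ S.testBit n = true := by
  rw [Nat.one_shiftLeft, Nat.and_two_pow]
  cases h : S.testBit n <;> simp [Nat.pow_eq_zero]

theorem step_bits (s p : List Int) (hs : s ≠ []) (x : Int) (S : Nat)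
    (hS : ∀ k, S.testBit k = decide (k < s.length ∧ s.take (k+1) <:+ p)) :
    ∀ k, (((S <<< 1) ||| 1) &&& (maskOf s).getD x 0).testBit k
      = decide (k < s.length ∧ s.take (k+1) <:+ p ++ [x]) := by
  intro k
  have hm : 0 < s.length := List.length_pos_iff.mpr hs
  rw [Nat.testBit_and, Nat.testBit_or, Nat.testBit_shiftLeft, mask_inv s x k]
  cases k with
  | zero =>
      simp [take_succ_suffix_iff s p x 0 hm, List.getElem?_eq_getElem hm,
        List.nil_suffix, eq_comm]
  | succ k' =>
      by_cases hk : k' + 1 < s.length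
      · have hk' : k' < s.length := by omega
        have h1 : Nat.testBit 1 (k'+1) = false := by
          simp [Nat.testBit_add_one]
        simp [take_succ_suffix_iff s p x (k'+1) hk, hS k', hk, hk', h1, eq_comm]
      · simp [hk]

theorem dp_inv (s : List Int) (hs : s ≠ []) (p : List Int) :
    (∀ k, ((foldB s p).1).testBit k = decide (k < s.length ∧ s.take (k+1) <:+ p))
    ∧ (foldB s p).2 = lastEndRev s p.reverse := by
  have hm : 0 < s.length := List.length_pos_iff.mpr hs
  induction p using List.reverseRecOn with
  | nil =>
      constructor
      · intro k
        simp [foldB, PySem.List.enumerate_nil, List.suffix_nil, List.take_eq_nil_iff, hs]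
      · simp [foldB, PySem.List.enumerate_nil, lastEndRev]
  | append_singleton p x ih =>
      have hstep : foldB s (p ++ [x]) =
          (let S' := (((foldB s p).1 <<< 1) ||| 1) &&& (maskOf s).getD x 0
           (S', if S' &&& ((1 : Nat) <<< (s.length - 1)) ≠ 0 then ((0:Int) + (p.length : Int))
                else (foldB s p).2)) := by
        unfold foldB
        rw [PySem.List.enumerate_append, List.foldl_append]
        simp only [PySem.List.enumerate_cons, PySem.List.enumerate_nil, List.foldl_cons,
          List.foldl_nil]
      rw [hstep]
      have hbits := step_bits s p hs x (foldB s p).1 ih.1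
      constructor
      · intro k
        exact hbits k
      · simp only []
        have hgoal : ((((foldB s p).1 <<< 1) ||| 1) &&& (maskOf s).getD x 0)
              &&& ((1 : Nat) <<< (s.length - 1)) ≠ 0
            ↔ (s <:+ p ++ [x]) := by
          rw [and_goal_ne]
          rw [hbits (s.length - 1)]
          have h1 : s.length - 1 + 1 = s.length := by omega
          have h2 : s.length - 1 < s.length := by omega
          simp [h1, h2, List.take_length]
        have hrev : (s.reverse <+: x :: p.reverse) ↔ (s <:+ p ++ [x]) := by
          have h1 : x :: p.reverse = (p ++ [x]).reverse := by simp
          rw [h1, List.reverse_prefix]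
        rw [List.reverse_append]
        simp only [List.reverse_cons, List.reverse_nil, List.nil_append, List.singleton_append,
          lastEndRev]
        rw [if_congr hgoal rfl rfl, if_congr hrev rfl rfl, ih.2]
        simp

theorem alt_char (w s : List Int) (hs : s ≠ []) :
    get_sublist_positions_alt w s =
      (if lastEndRev s w.reverse < 0 then []
       else PySem.List.pyRange (lastEndRev s w.reverse - (s.length : Int) + 1)
              (lastEndRev s w.reverse + 1) 1) := by
  unfold get_sublist_positions_alt
  rw [if_neg (by simpa using hs)]
  simp only []
  rw [show ((PySem.List.enumerate w 0).foldl
      (fun (st : Nat × Int) jx =>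
        let S' := ((st.1 <<< 1) ||| 1) &&&
          ((PySem.List.enumerate s 0).foldl
            (fun (d : PySem.Dict Int Nat) kc =>
              d.insert kc.2 ((d.getD kc.2 0) ||| (1 <<< kc.1.toNat)))
            PySem.Dict.empty).getD jx.2 0
        (S', if S' &&& ((1 : Nat) <<< (s.length - 1)) ≠ 0 then jx.1 else st.2))
      ((0 : Nat), (-1 : Int))) = foldB s w from rfl]
  rw [(dp_inv s hs w).2]

theorem suffix_take_iff_slice (w s : List Int) (t : Nat) (ht : t + 1 ≤ w.length) :
    (s <:+ w.take (t+1)) ↔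
      (s.length ≤ t+1 ∧
        s = PySem.List.slice w (some ((t+1-s.length : Nat) : Int))
              (some (((t+1-s.length : Nat) : Int) + (s.length : Int)))) := by
  rw [PySem.List.slice_natCast_add]
  constructor
  · intro h
    have hle : s.length ≤ t+1 := by
      have := h.length_le
      simpa [List.length_take, Nat.min_eq_left ht] using this
    refine ⟨hle, ?_⟩
    obtain ⟨u, hu⟩ := h
    have hul : u.length = t+1 - s.length := by
      have := congrArg List.length hu
      simp [List.length_take, Nat.min_eq_left ht] at this
      omega
    have hdrop : s = (w.take (t+1)).drop (t+1 - s.length) := by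
      rw [← hu, ← hul, List.drop_left]
    have hmm : t+1 - (t+1 - s.length) = s.length := by omega
    conv_lhs => rw [hdrop]
    rw [List.drop_take, hmm]
  · rintro ⟨hle, hgoal⟩
    have hmm : t+1 - (t+1 - s.length) = s.length := by omega
    have : (w.take (t+1)).drop (t+1-s.length) = (w.drop (t+1-s.length)).take s.length := by
      rw [List.drop_take, hmm]
    rw [hgoal, ← this]
    exact List.drop_suffix _ _

theorem lastEnd_eq_ofStart (w s : List Int) (hs : s ≠ []) :
    ∀ t, t ≤ w.length →
      lastEndRev s ((w.take t).reverse) = ofStart s.length (lastStartC w s (t - (s.length - 1))) := by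
  intro t
  induction t with
  | zero => intro _; simp [lastEndRev, lastStartC, ofStart]
  | succ t ih =>
      intro ht
      have htlt : t < w.length := by omega
      have hm1 : 1 ≤ s.length := List.length_pos_iff.mpr hs
      have h2 : w.take (t+1) = w.take t ++ [w[t]] := by
        rw [List.take_add_one, List.getElem?_eq_getElem htlt]
        simp
      rw [h2]
      simp only [List.reverse_append, List.reverse_cons, List.reverse_nil, List.nil_append,
        List.singleton_append, lastEndRev]
      have hrev : (s.reverse <+: w[t] :: (w.take t).reverse) ↔ (s <:+ w.take (t+1)) := by
        have h1 : w[t] :: (w.take t).reverse = (w.take (t+1)).reverse := by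
          rw [h2, List.reverse_append]
          simp
        rw [h1, List.reverse_prefix]
      rw [if_congr hrev rfl rfl, if_congr (suffix_take_iff_slice w s t ht) rfl rfl]
      by_cases hle : s.length ≤ t+1
      · have hc : t + 1 - (s.length - 1) = (t - (s.length - 1)) + 1 := by omega
        have hc2 : t - (s.length - 1) = t + 1 - s.length := by omega
        rw [hc]
        simp only [lastStartC, hc2]
        rw [if_congr (and_iff_right hle) rfl rfl]
        split_ifs with h1
        · rw [List.length_reverse, List.length_take, Nat.min_eq_left (by omega)]
          unfold ofStart
          have hnn : ¬ (((t+1-s.length : Nat) : Int) < 0) := by omega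
          rw [if_neg hnn]
          omega
        · rw [← hc2]
          exact ih (by omega)
      · have hc : t + 1 - (s.length - 1) = t - (s.length - 1) := by omega
        rw [hc, if_neg (fun h => hle h.1)]
        exact ih (by omega)

theorem altGo_range (w s : List Int) (c : Nat) :
    altGo w s (((List.range c).map (fun (k : Nat) => (k : Int))).reverse)
      = if lastStartC w s c < 0 then []
        else PySem.List.pyRange (lastStartC w s c) ((s.length : Int) + lastStartC w s c) 1 := by
  induction c with
  | zero => simp [altGo, lastStartC]
  | succ c ih =>
      rw [List.range_succ]
      simp only [List.map_append, List.map_cons, List.map_nil, List.reverse_append,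
        List.reverse_cons, List.reverse_nil, List.nil_append, List.singleton_append, altGo,
        lastStartC]
      by_cases h : s = PySem.List.slice w (some (c : Int)) (some ((c : Int) + (s.length : Int)))
      · rw [if_pos h, if_pos h, if_neg (show ¬ ((c : Int) < 0) by omega)]
      · rw [if_neg h, if_neg h, ih]

theorem pyRange_zero_eq (b : Int) :
    PySem.List.pyRange 0 b 1 = (List.range b.toNat).map (fun (k : Nat) => (k : Int)) := by
  rw [PySem.List.pyRange_one]
  simp only [Int.sub_zero, zero_add]

theorem A_nil (w : List Int) : get_sublist_positions w [] = [] := by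
  unfold get_sublist_positions
  simp only [List.length_nil, Nat.cast_zero]
  generalize PySem.List.pyRange 0 ((w.length : Int) - 0 + 1) 1 = L
  induction L with
  | nil => rfl
  | cons i L ihl =>
      rw [List.foldl_cons]
      have : (if ([] : List Int) = PySem.List.slice w (some i) (some (i + 0)) then
          PySem.List.pyRange i (0 + i) 1 else ([] : List Int)) = [] := by
        split_ifs
        · rw [zero_add]; exact PySem.List.pyRange_one_eq_nil (le_refl i)
        · rfl
      rw [this]
      exact ihl

theorem get_sublist_positions_eq (w s : List Int) :
    get_sublist_positions w s = get_sublist_positions_alt w s := by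
  by_cases hs : s = []
  · subst hs
    rw [A_nil]
    unfold get_sublist_positions_alt
    simp
  · have hm1 : 1 ≤ s.length := List.length_pos_iff.mpr hs
    unfold get_sublist_positions
    rw [foldl_last_eq_altGo_reverse]
    have hr : PySem.List.pyRange 0 ((w.length : Int) - (s.length : Int) + 1) 1
        = (List.range (w.length - (s.length - 1))).map (fun (k : Nat) => (k : Int)) := by
      rw [pyRange_zero_eq]
      congr 2
      omega
    rw [hr, altGo_range]
    rw [alt_char w s hs]
    have hL := lastEnd_eq_ofStart w s hs w.length (le_refl _)
    rw [List.take_length] at hL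
    rw [hL]
    set v := lastStartC w s (w.length - (s.length - 1)) with hv
    unfold ofStart
    by_cases hvneg : v < 0
    · simp [hvneg]
    · rw [if_neg hvneg, if_neg hvneg]
      have hge : ¬ (v + (s.length : Int) - 1 < 0) := by omega
      rw [if_neg hge]
      have e1 : v + (s.length : Int) - 1 - (s.length : Int) + 1 = v := by ring
      have e2 : v + (s.length : Int) - 1 + 1 = (s.length : Int) + v := by ring
      rw [e1, e2]

theorem get_sublist_positions_spec : Claim_equal_get_sublist_positions := by
  intro w s _
  exact get_sublist_positions_eq w s
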